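-- pv_equiv track=rewrite | github.com/vaibhavvikas/fasta-sequence-retrieval | fasta_sequence_retrieval/services/ncbi_sequence_retrieval.py | get_definition
-- ===== SOURCE A (Python) =====
-- def get_definition(data: list[str]):
--     definition = []
--     flag = False
--     for line in data:
--         if flag:
--             if not line.split(" ")[0].isupper():
--                 definition.extend(line.split())
--             else:
--                 break
--
--         if line.startswith("DEFINITION"):
--             definition.extend(line.split(" ")[1:])
--             flag = True
--
--     return " ".join(definition)
-- ===== SOURCE B (Python) =====
-- def get_definition(data: list[str]):
--     # three-stage: locate the DEFINITION line, slice out its continuation block, flatten to words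
--     for i, line in enumerate(data):
--         if line.startswith("DEFINITION"):
--             rest = data[i + 1:]
--             stops = [j for j, l in enumerate(rest) if l.split(" ")[0].isupper()]
--             block = rest[:stops[0]] if stops else rest
--             tokens = line.split(" ")[1:] + [w for l in block for w in l.split()]
--             return " ".join(tokens)
--     return ""
-- ===== Notes on version B (the rewrite author's own statement) =====
-- stated objective: simpler
-- what changed: Replaced the single-pass boolean-flag state machine by a three-stage declarative pipeline: find the DEFINITION line, slice out the continuation block up to the first uppercase-first-token line, and flatten it to words with a comprehension.
-- intended difference: On inputs where a continuation line before the break itself starts with 'DEFINITION' and contains a space, A appends that line's words twice (its full split plus its split(' ')[1:] tail, a leftover of the flag machine), while B counts each continuation line's words once, which is the intended reading of the block. — e.g. on get_definition(["DEFINITION foo", "DEFINITIONx bar"]): A returns "foo DEFINITIONx bar bar", B returns "foo DEFINITIONx bar"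
import Mathlib
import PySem

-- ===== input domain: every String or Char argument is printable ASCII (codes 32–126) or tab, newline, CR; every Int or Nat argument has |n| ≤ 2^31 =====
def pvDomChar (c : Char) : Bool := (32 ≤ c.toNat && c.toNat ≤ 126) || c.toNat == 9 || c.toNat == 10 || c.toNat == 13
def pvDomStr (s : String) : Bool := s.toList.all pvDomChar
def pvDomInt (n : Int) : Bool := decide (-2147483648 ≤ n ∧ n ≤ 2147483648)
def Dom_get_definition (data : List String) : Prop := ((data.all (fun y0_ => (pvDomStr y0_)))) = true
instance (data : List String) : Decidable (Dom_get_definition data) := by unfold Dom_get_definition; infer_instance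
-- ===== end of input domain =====

-- B replaces A's boolean-flag state machine by a three-stage pipeline (find / slice block / flatten);
-- on the exceptional D_ inputs A double-counts a continuation line's tail and B returns the intended value.

-- shared primitive ports of Python expressions both programs (and D_) use:
-- s.split(" ")[0]; split(" ") with a nonempty separator always yields a nonempty list, so [0] is total
def pvFirstTok (s : String) : String := ((PySem.Str.split? s " ").getD []).headD ""
-- s.split(" ")[1:]
def pvTailSplit (s : String) : List String := ((PySem.Str.split? s " ").getD []).tail
-- s.isupper(): some cased character and no lowercase one; exact on the ASCII domain
def pvStrUpper (s : String) : Bool :=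
  (s.toList.any (fun c => PySem.Str.isupper c || PySem.Str.islower c)) &&
  (s.toList.all (fun c => ! PySem.Str.islower c))
-- line.split(" ")[0].isupper()
def pvUpperFirst (s : String) : Bool := pvStrUpper (pvFirstTok s)

-- ===== PORT A =====
def pvGoA : List String → List String → Bool → List String
  | [], defn, _ => defn
  | l :: ls, defn, flag =>
    if flag then
      if pvUpperFirst l then defn  -- break
      else
        -- definition.extend(line.split()); then conditionally definition.extend(line.split(" ")[1:])
        if PySem.Str.startswith l "DEFINITION" then
          pvGoA ls (defn ++ PySem.Str.split₀ l ++ pvTailSplit l) true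
        else pvGoA ls (defn ++ PySem.Str.split₀ l) true
    else
      if PySem.Str.startswith l "DEFINITION" then pvGoA ls (defn ++ pvTailSplit l) true
      else pvGoA ls defn false

def get_definition (data : List String) : String :=
  PySem.Str.join " " (pvGoA data [] false)

-- ===== PORT B =====
-- stage 1: the 'for i, line in enumerate(data)' search for the DEFINITION line (line, data[i+1:])
def pvFindB : List String → Option (String × List String)
  | [] => none
  | l :: ls => if PySem.Str.startswith l "DEFINITION" then some (l, ls) else pvFindB ls

def get_definition_alt (data : List String) : String :=
  match pvFindB data with
  | none => ""
  | some (line, rest) =>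
    -- stops = [j for j, l in enumerate(rest) if l.split(" ")[0].isupper()]
    let stops := (PySem.List.enumerate rest).filterMap
      (fun p => if pvUpperFirst p.2 then some p.1 else none)
    -- block = rest[:stops[0]] if stops else rest
    let block := match stops with
      | [] => rest
      | j :: _ => PySem.List.slice rest none (some j)
    -- tokens = line.split(" ")[1:] + [w for l in block for w in l.split()]
    PySem.Str.join " " (pvTailSplit line ++ block.flatMap PySem.Str.split₀)

-- ===== PRECONDITION & SPEC =====
-- On inputs where, after the first DEFINITION line and before the first continuation line whose
-- first token is all-uppercase, some continuation line itself starts with "DEFINITION" and has a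
-- nonempty split(" ")[1:], A appends that line's words twice (full split() plus the tail — a
-- leftover of its flag machine), while B counts each continuation line's words once, the intended value.
def D_get_definition (data : List String) : Prop :=
  ((((data.dropWhile (fun l => ! PySem.Str.startswith l "DEFINITION")).tail).takeWhile
      (fun l => ! pvUpperFirst l)).any
    (fun l => PySem.Str.startswith l "DEFINITION" && ! (pvTailSplit l).isEmpty)) = true
instance (data : List String) : Decidable (D_get_definition data) := by unfold D_get_definition; infer_instance

def Spec_get_definition (data : List String) (out : String) : Prop :=
  ¬ D_get_definition data → out = get_definition_alt data
instance (data : List String) (out : String) : Decidable (Spec_get_definition data out) := by unfold Spec_get_definition; infer_instance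

def pvDiffWitness_get_definition : List String := ["DEFINITION foo", "DEFINITIONx bar"]
def pvDiffWitnessOut_get_definition : String × String := ("foo DEFINITIONx bar bar", "foo DEFINITIONx bar")

-- ===== CLAIM (what is proved, stated in full; the proofs are below) =====
def Claim_unchanged_get_definition : Prop := ∀ (data : List String), Dom_get_definition data → Spec_get_definition data (get_definition data)
def Claim_changed_get_definition : Prop := Dom_get_definition (pvDiffWitness_get_definition) ∧ D_get_definition (pvDiffWitness_get_definition) ∧ get_definition (pvDiffWitness_get_definition) = pvDiffWitnessOut_get_definition.1 ∧ get_definition_alt (pvDiffWitness_get_definition) = pvDiffWitnessOut_get_definition.2 ∧ pvDiffWitnessOut_get_definition.1 ≠ pvDiffWitnessOut_get_definition.2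
def Claim_exact_get_definition : Prop := ∀ (data : List String), Dom_get_definition data → D_get_definition data → get_definition data ≠ get_definition_alt data

-- ===== LEMMAS AND PROOFS =====

-- B's word list for the continuation block
def pvWB (cont : List String) : List String :=
  (cont.takeWhile (fun l => ! pvUpperFirst l)).flatMap PySem.Str.split₀

-- phase correspondence: A's flag-false loop is B's search
lemma pvFindB_dropWhile (data : List String) :
    data.dropWhile (fun l => ! PySem.Str.startswith l "DEFINITION") =
      (match pvFindB data with | none => [] | some (l, ls) => l :: ls) := by
  induction data with
  | nil => rfl
  | cons l ls ih =>
    cases h : PySem.Str.startswith l "DEFINITION" with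
    | true => simp only [pvFindB, List.dropWhile_cons, h, Bool.not_true]; simp
    | false => simp only [pvFindB, List.dropWhile_cons, h, Bool.not_false]; simpa using ih

lemma pvGoA_false (data : List String) : ∀ defn,
    pvGoA data defn false =
      (match pvFindB data with
       | none => defn
       | some (l, ls) => pvGoA ls (defn ++ pvTailSplit l) true) := by
  induction data with
  | nil => intro defn; rfl
  | cons l ls ih =>
    intro defn
    simp only [pvGoA, pvFindB, Bool.false_eq_true, if_false]
    split_ifs with h1
    · rfl
    · rw [ih]

-- in flag mode A only appends
lemma pvGoA_shift (ls : List String) : ∀ defn, pvGoA ls defn true = defn ++ pvGoA ls [] true := by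
  induction ls with
  | nil => intro defn; simp [pvGoA]
  | cons l ls ih =>
    intro defn
    simp only [pvGoA, if_true]
    split_ifs with h1 h2
    · simp
    · rw [ih (defn ++ PySem.Str.split₀ l ++ pvTailSplit l),
          ih ([] ++ PySem.Str.split₀ l ++ pvTailSplit l)]
      simp
    · rw [ih (defn ++ PySem.Str.split₀ l), ih ([] ++ PySem.Str.split₀ l)]
      simp

-- B's stops/slice block is the takeWhile block
lemma pvStops_ge (ls : List String) (s : Int) (j : Int)
    (h : j ∈ (PySem.List.enumerate ls s).filterMap
      (fun p => if pvUpperFirst p.2 then some p.1 else none)) : s ≤ j := by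
  rcases List.mem_filterMap.mp h with ⟨p, hp, hf⟩
  rcases (PySem.List.mem_enumerate_iff ls s p).mp hp with ⟨k, hk, rfl⟩
  split at hf
  · have : (s + (k : Int)) = j := by simpa using hf
    omega
  · simp at hf

lemma pvBlock_eq (ls : List String) : ∀ (s : Int), 0 ≤ s →
    (match (PySem.List.enumerate ls s).filterMap
        (fun p => if pvUpperFirst p.2 then some p.1 else none) with
      | [] => ls
      | j :: _ => PySem.List.slice ls none (some (j - s))) =
      ls.takeWhile (fun l => ! pvUpperFirst l) := by
  induction ls with
  | nil => intro s _; simp [PySem.List.enumerate_nil]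
  | cons l ls ih =>
    intro s hs
    rw [PySem.List.enumerate_cons]
    simp only [List.filterMap_cons, List.takeWhile_cons]
    by_cases h : pvUpperFirst l
    · rw [if_pos h]
      simp only [h, Bool.not_true]
      show PySem.List.slice (l :: ls) none (some (s - s)) = _
      rw [PySem.List.slice_to _ (by omega : (0:Int) ≤ s - s)]
      simp
    · rw [if_neg h]
      simp only [eq_false_of_ne_true h, Bool.not_false, if_pos rfl]
      have ih' := ih (s + 1) (by omega)
      rcases hst : (PySem.List.enumerate ls (s+1)).filterMap
          (fun p => if pvUpperFirst p.2 then some p.1 else none) with _ | ⟨j, rest⟩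
      · rw [hst] at ih' ⊢
        exact congrArg (l :: ·) ih'
      · rw [hst] at ih' ⊢
        have hj : s + 1 ≤ j := pvStops_ge ls (s+1) j (by rw [hst]; exact List.mem_cons_self ..)
        have ih'' : PySem.List.slice ls none (some (j - (s+1))) =
            ls.takeWhile (fun l => ! pvUpperFirst l) := ih'
        show PySem.List.slice (l :: ls) none (some (j - s)) = _
        rw [PySem.List.slice_to _ (by omega : (0:Int) ≤ j - s)]
        rw [PySem.List.slice_to _ (by omega : (0:Int) ≤ j - (s+1))] at ih''
        have hnt : (j - s).toNat = (j - (s+1)).toNat + 1 := by omega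
        rw [hnt, List.take_succ_cons]
        exact congrArg (l :: ·) ih''

lemma pvAlt_eq (data : List String) :
    get_definition_alt data =
      (match pvFindB data with
       | none => ""
       | some (l, rest) => PySem.Str.join " " (pvTailSplit l ++ pvWB rest)) := by
  unfold get_definition_alt
  rcases h : pvFindB data with _ | ⟨l, rest⟩
  · rfl
  · simp only []
    have hb := pvBlock_eq rest 0 le_rfl
    simp only [Int.sub_zero] at hb
    simp only [pvWB]
    rw [hb]

-- A's flag-mode scan equals B's flattened block when no block line double-counts
lemma pvScan_eq (cont : List String)
    (h : ∀ l ∈ cont.takeWhile (fun l => ! pvUpperFirst l),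
        PySem.Str.startswith l "DEFINITION" = true → pvTailSplit l = []) :
    pvGoA cont [] true = pvWB cont := by
  induction cont with
  | nil => rfl
  | cons l ls ih =>
    cases hu : pvUpperFirst l with
    | true => simp [pvGoA, hu, pvWB, List.takeWhile_cons]
    | false =>
      have hmem : l ∈ (l :: ls).takeWhile (fun l => ! pvUpperFirst l) := by
        simp [List.takeWhile_cons, hu]
      have hls : ∀ x ∈ ls.takeWhile (fun l => ! pvUpperFirst l),
          PySem.Str.startswith x "DEFINITION" = true → pvTailSplit x = [] := by
        intro x hx
        exact h x (by simp [List.takeWhile_cons, hu, hx])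
      have hWB : pvWB (l :: ls) = PySem.Str.split₀ l ++ pvWB ls := by
        simp [pvWB, List.takeWhile_cons, hu]
      have ihh := ih hls
      simp only [pvGoA, hu, Bool.false_eq_true, if_false, if_true, List.nil_append]
      by_cases hd : PySem.Str.startswith l "DEFINITION" = true
      · rw [if_pos hd, h l hmem hd, pvGoA_shift, ihh, hWB]
        simp
      · rw [if_neg hd, pvGoA_shift, ihh, hWB]

-- ===== weight machinery for the tight theorem =====
def pvWt (xs : List String) : Nat := (xs.map (fun s => s.toList.length)).sum + xs.length

lemma pvWt_append (xs ys : List String) : pvWt (xs ++ ys) = pvWt xs + pvWt ys := by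
  simp [pvWt]; omega

lemma pvWt_pos {xs : List String} (h : xs ≠ []) : 1 ≤ pvWt xs := by
  cases xs with
  | nil => simp at h
  | cons x xs => simp [pvWt]; omega

-- length of " ".join
lemma pvJoin_len (ps : List (List Char)) (h : ps ≠ []) :
    (PySem.Chars.join [' '] ps).length = (ps.map List.length).sum + ps.length - 1 := by
  induction ps with
  | nil => simp at h
  | cons p ps ih =>
    cases ps with
    | nil => simp [PySem.Chars.join_singleton]
    | cons q rest =>
      rw [PySem.Chars.join_cons_cons]
      have ihh := ih (by simp)
      simp only [List.map_cons, List.sum_cons, List.length_cons, List.length_append,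
        List.length_nil] at ihh ⊢
      omega

lemma pvJoin_wt (xs : List String) (h : xs ≠ []) :
    (PySem.Str.join " " xs).toList.length = pvWt xs - 1 := by
  rw [PySem.Str.toList_join]
  have hsep : (" ".toList) = [' '] := rfl
  rw [hsep, pvJoin_len _ (by simpa using h)]
  unfold pvWt
  rw [List.map_map, List.length_map]
  rfl

-- split₀ of a line that starts with "DEFINITION" is nonempty
lemma pvSplit₀go_ne_nil (s : List Char) : ∀ cur acc, (cur ≠ [] ∨ acc ≠ []) →
    PySem.Chars.split₀.go s cur acc ≠ [] := by
  induction s with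
  | nil =>
    intro cur acc h
    simp only [PySem.Chars.split₀.go]
    split_ifs with hc
    · simp only [List.isEmpty_iff] at hc
      rcases h with h | h
      · exact absurd hc h
      · simpa using h
    · simp
  | cons c rest ih =>
    intro cur acc h
    simp only [PySem.Chars.split₀.go]
    split_ifs with hsp hc
    · simp only [List.isEmpty_iff] at hc
      apply ih
      right
      rcases h with h' | h'
      · exact absurd hc h'
      · exact h'
    · exact ih [] _ (Or.inr (by simp))
    · exact ih (c :: cur) acc (Or.inl (by simp))

lemma pvSplit₀_startswith_ne_nil (l : String) (h : PySem.Str.startswith l "DEFINITION" = true) :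
    PySem.Str.split₀ l ≠ [] := by
  intro hnil
  have hb : PySem.Chars.split₀ l.toList = [] := by
    rw [← PySem.Str.split₀_map_toList, hnil]; rfl
  rcases (PySem.Chars.startswith_iff l.toList "DEFINITION".toList).mp (by simpa using h) with ⟨t, ht⟩
  rw [← ht] at hb
  have hD : ("DEFINITION".toList : List Char) = 'D' :: "EFINITION".toList := by decide
  rw [hD, List.cons_append] at hb
  simp only [PySem.Chars.split₀, PySem.Chars.split₀.go] at hb
  rw [show PySem.Chars.isspace 'D' = false from by decide] at hb
  simp only [Bool.false_eq_true, if_false] at hb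
  exact pvSplit₀go_ne_nil _ ['D'] [] (Or.inl (by simp)) hb

-- A's flag-mode scan weighs at least B's block
lemma pvScan_ge (cont : List String) : pvWt (pvWB cont) ≤ pvWt (pvGoA cont [] true) := by
  induction cont with
  | nil => simp [pvWB, pvGoA]
  | cons l ls ih =>
    cases hu : pvUpperFirst l with
    | true => simp [pvGoA, hu, pvWB, List.takeWhile_cons]
    | false =>
      have hWB : pvWB (l :: ls) = PySem.Str.split₀ l ++ pvWB ls := by
        simp [pvWB, List.takeWhile_cons, hu]
      simp only [pvGoA, hu, Bool.false_eq_true, if_false, if_true, List.nil_append]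
      by_cases hd : PySem.Str.startswith l "DEFINITION" = true
      · rw [if_pos hd, pvGoA_shift, hWB, pvWt_append, pvWt_append, pvWt_append]
        omega
      · rw [if_neg hd, pvGoA_shift, hWB, pvWt_append, pvWt_append]
        omega

-- with a double-counted line in the block, A weighs strictly more
lemma pvScan_gt (cont : List String)
    (h : (cont.takeWhile (fun l => ! pvUpperFirst l)).any
        (fun l => PySem.Str.startswith l "DEFINITION" && ! (pvTailSplit l).isEmpty) = true) :
    pvWt (pvWB cont) + 1 ≤ pvWt (pvGoA cont [] true) := by
  induction cont with
  | nil => simp at h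
  | cons l ls ih =>
    cases hu : pvUpperFirst l with
    | true => simp [List.takeWhile_cons, hu] at h
    | false =>
      have htw : (l :: ls).takeWhile (fun l => ! pvUpperFirst l) =
          l :: ls.takeWhile (fun l => ! pvUpperFirst l) := by
        simp [List.takeWhile_cons, hu]
      rw [htw, List.any_cons] at h
      have hWB : pvWB (l :: ls) = PySem.Str.split₀ l ++ pvWB ls := by
        simp [pvWB, List.takeWhile_cons, hu]
      simp only [pvGoA, hu, Bool.false_eq_true, if_false, if_true, List.nil_append]
      rcases (Bool.or_eq_true _ _).mp h with hq | hrest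
      · have hd : PySem.Str.startswith l "DEFINITION" = true := ((Bool.and_eq_true _ _).mp hq).1
        have htail : pvTailSplit l ≠ [] := by
          have h2 := ((Bool.and_eq_true _ _).mp hq).2
          simpa using h2
        rw [if_pos hd, pvGoA_shift, hWB, pvWt_append, pvWt_append, pvWt_append]
        have h1 := pvWt_pos htail
        have h2 := pvScan_ge ls
        omega
      · have hih := ih hrest
        by_cases hd : PySem.Str.startswith l "DEFINITION" = true
        · rw [if_pos hd, pvGoA_shift, hWB, pvWt_append, pvWt_append, pvWt_append]
          omega
        · rw [if_neg hd, pvGoA_shift, hWB, pvWt_append, pvWt_append]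
          omega

-- the block of D_ contains a startswith-DEFINITION line, so B's word list is nonempty
lemma pvWB_ne_nil (cont : List String)
    (h : (cont.takeWhile (fun l => ! pvUpperFirst l)).any
        (fun l => PySem.Str.startswith l "DEFINITION" && ! (pvTailSplit l).isEmpty) = true) :
    pvWB cont ≠ [] := by
  rcases List.any_eq_true.mp h with ⟨l, hl, hq⟩
  have hd : PySem.Str.startswith l "DEFINITION" = true := ((Bool.and_eq_true _ _).mp hq).1
  have : PySem.Str.split₀ l ≠ [] := pvSplit₀_startswith_ne_nil l hd
  intro hnil
  rcases List.exists_mem_of_ne_nil _ this with ⟨w, hw⟩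
  have : w ∈ pvWB cont := by
    unfold pvWB
    exact List.mem_flatMap.mpr ⟨l, hl, hw⟩
  rw [hnil] at this
  simp at this

-- ===== VERDICT (by name: the statements are the Claim_ definitions above) =====
theorem get_definition_spec : Claim_unchanged_get_definition := by
  intro data _ hnd
  unfold get_definition
  rw [pvGoA_false, pvAlt_eq]
  unfold D_get_definition at hnd
  rw [pvFindB_dropWhile] at hnd
  rcases h : pvFindB data with _ | ⟨l, rest⟩
  · rfl
  · rw [h] at hnd
    simp only [List.tail_cons, List.any_eq_true, not_exists, not_and] at hnd
    show PySem.Str.join " " (pvGoA rest ([] ++ pvTailSplit l) true) =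
      PySem.Str.join " " (pvTailSplit l ++ pvWB rest)
    rw [List.nil_append, pvGoA_shift, pvScan_eq rest ?_]
    intro x hx hd
    have hh := hnd x hx
    rw [hd] at hh
    simpa using hh

theorem get_definition_changed : Claim_changed_get_definition := by
  unfold Claim_changed_get_definition; decide

theorem get_definition_tight : Claim_exact_get_definition := by
  intro data _ hd heq
  unfold D_get_definition at hd
  rw [pvFindB_dropWhile] at hd
  unfold get_definition at heq
  rw [pvGoA_false, pvAlt_eq] at heq
  rcases h : pvFindB data with _ | ⟨l, rest⟩
  · rw [h] at hd; simp at hd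
  · rw [h] at hd heq
    simp only [List.tail_cons] at hd
    have heq' : PySem.Str.join " " (pvGoA rest ([] ++ pvTailSplit l) true) =
        PySem.Str.join " " (pvTailSplit l ++ pvWB rest) := heq
    rw [List.nil_append, pvGoA_shift] at heq'
    have hgt := pvScan_gt rest hd
    have hne := pvWB_ne_nil rest hd
    have hge := pvScan_ge rest
    have hA : pvTailSplit l ++ pvGoA rest [] true ≠ [] := by
      intro hn
      have h2 : pvGoA rest [] true = [] := (List.append_eq_nil_iff.mp hn).2
      rw [h2, show pvWt ([] : List String) = 0 from rfl] at hge
      have h1 := pvWt_pos hne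
      omega
    have hB : pvTailSplit l ++ pvWB rest ≠ [] := by
      intro hn
      exact hne (List.append_eq_nil_iff.mp hn).2
    have hlen := congrArg (fun s => s.toList.length) heq'
    simp only at hlen
    rw [pvJoin_wt _ hA, pvJoin_wt _ hB, pvWt_append, pvWt_append] at hlen
    have h1 := pvWt_pos hne
    omega
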